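-- pv_equiv track=rewrite | github.com/Ghahrep/gertie | mcp/consensus_builder.py | _get_similar_stance_words
-- ===== SOURCE A (Python) =====
-- def _get_similar_stance_words(stance1: str, stance2: str) -> bool:
--     """Check for semantically similar stance words"""
--
--     similar_groups = [
--         ["bullish", "optimistic", "positive", "growth", "aggressive"],
--         ["bearish", "pessimistic", "negative", "decline", "conservative"],
--         ["neutral", "balanced", "moderate", "cautious"],
--         ["buy", "purchase", "acquire", "increase"],
--         ["sell", "reduce", "decrease", "exit"],
--         ["hold", "maintain", "keep", "stay"]
--     ]
--
--     for group in similar_groups: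
--         if any(word in stance1 for word in group) and any(word in stance2 for word in group):
--             return True
--
--     return False
-- ===== SOURCE B (Python) =====
-- def _get_similar_stance_words(stance1: str, stance2: str) -> bool:
--     """Check for semantically similar stance words"""
--
--     word_bits = {
--         "bullish": 1, "optimistic": 1, "positive": 1, "growth": 1, "aggressive": 1,
--         "bearish": 2, "pessimistic": 2, "negative": 2, "decline": 2, "conservative": 2,
--         "neutral": 4, "balanced": 4, "moderate": 4, "cautious": 4,
--         "buy": 8, "purchase": 8, "acquire": 8, "increase": 8,
--         "sell": 16, "reduce": 16, "decrease": 16, "exit": 16,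
--         "hold": 32, "maintain": 32, "keep": 32, "stay": 32,
--     }
--
--     def matched_mask(s: str) -> int:
--         mask = 0
--         for i in range(len(s)):
--             for word, bit in word_bits.items():
--                 if s.startswith(word, i):
--                     mask |= bit
--         return mask
--
--     return (matched_mask(stance1) & matched_mask(stance2)) != 0
-- ===== Notes on version B (the rewrite author's own statement) =====
-- stated objective: alternative
-- what changed: B flattens the group table into a flat word-to-bitmask map and runs a position-scan multi-pattern matcher over each stance (testing startswith at every index, accumulating a group bitmask), then ANDs the two bitmasks; A instead loops over the groups and substring-tests both stances per group with an early return.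
import Mathlib
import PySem

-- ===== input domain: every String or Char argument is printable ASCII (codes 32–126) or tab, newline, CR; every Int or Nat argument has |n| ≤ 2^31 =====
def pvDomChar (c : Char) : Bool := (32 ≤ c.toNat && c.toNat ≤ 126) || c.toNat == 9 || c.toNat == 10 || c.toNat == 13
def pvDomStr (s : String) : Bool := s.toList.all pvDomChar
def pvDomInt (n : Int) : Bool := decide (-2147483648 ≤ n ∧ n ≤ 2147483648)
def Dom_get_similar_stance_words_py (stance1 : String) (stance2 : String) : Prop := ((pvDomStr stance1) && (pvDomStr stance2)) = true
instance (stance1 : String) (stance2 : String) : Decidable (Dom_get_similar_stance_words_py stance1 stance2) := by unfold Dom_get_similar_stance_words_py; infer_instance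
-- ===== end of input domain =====

-- B replaces A's per-group early-return loop (substring-testing both stances group by group) with a
-- flat word→bitmask table and a position-scan matcher per stance, combining the two masks with a bitwise AND (alternative).


-- ===== PORT A =====
-- A's literal table of similar-word groups
def pvSimilarGroups : List (List String) :=
  [ ["bullish", "optimistic", "positive", "growth", "aggressive"],
    ["bearish", "pessimistic", "negative", "decline", "conservative"],
    ["neutral", "balanced", "moderate", "cautious"],
    ["buy", "purchase", "acquire", "increase"],
    ["sell", "reduce", "decrease", "exit"],
    ["hold", "maintain", "keep", "stay"] ]

-- A's for-loop with early return: test BOTH stances against each group in turn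
def pvLoopA (stance1 : String) (stance2 : String) : List (List String) → Bool
  | [] => false
  | g :: rest =>
      if (g.any fun w => PySem.Str.isIn w stance1) && (g.any fun w => PySem.Str.isIn w stance2) then
        true
      else
        pvLoopA stance1 stance2 rest

def get_similar_stance_words_py (stance1 : String) (stance2 : String) : Bool :=
  pvLoopA stance1 stance2 pvSimilarGroups

-- ===== PORT B =====
-- B's flat word → group-bitmask table (the Python dict, in insertion order)
def pvWordBits : List (List Char × Nat) :=
  [ ("bullish".toList, 1), ("optimistic".toList, 1), ("positive".toList, 1), ("growth".toList, 1), ("aggressive".toList, 1),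
    ("bearish".toList, 2), ("pessimistic".toList, 2), ("negative".toList, 2), ("decline".toList, 2), ("conservative".toList, 2),
    ("neutral".toList, 4), ("balanced".toList, 4), ("moderate".toList, 4), ("cautious".toList, 4),
    ("buy".toList, 8), ("purchase".toList, 8), ("acquire".toList, 8), ("increase".toList, 8),
    ("sell".toList, 16), ("reduce".toList, 16), ("decrease".toList, 16), ("exit".toList, 16),
    ("hold".toList, 32), ("maintain".toList, 32), ("keep".toList, 32), ("stay".toList, 32) ]

-- B's matched_mask: scan every start position i; s.startswith(word, i) is exactly
-- "word is a prefix of s[i:]", i.e. List.isPrefixOf word (s.drop i)  (exact for every i in range(len(s)))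
def pvMatchedMask (s : List Char) : Nat :=
  (List.range s.length).foldl
    (fun mask i =>
      pvWordBits.foldl (fun mask p => if p.1.isPrefixOf (s.drop i) then mask ||| p.2 else mask) mask)
    0

def get_similar_stance_words_py_alt (stance1 : String) (stance2 : String) : Bool :=
  decide ((pvMatchedMask stance1.toList &&& pvMatchedMask stance2.toList) ≠ 0)

-- ===== PRECONDITION & SPEC =====
def Spec_get_similar_stance_words_py (stance1 : String) (stance2 : String) (out : Bool) : Prop := out = get_similar_stance_words_py_alt stance1 stance2
instance (stance1 : String) (stance2 : String) (out : Bool) : Decidable (Spec_get_similar_stance_words_py stance1 stance2 out) := by unfold Spec_get_similar_stance_words_py; infer_instance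

-- ===== CLAIM (what is proved, stated in full; the proofs are below) =====
def Claim_equal_get_similar_stance_words_py : Prop := ∀ (stance1 : String) (stance2 : String), Dom_get_similar_stance_words_py stance1 stance2 → Spec_get_similar_stance_words_py stance1 stance2 (get_similar_stance_words_py stance1 stance2)

-- ===== LEMMAS AND PROOFS =====

-- testBit through a foldl whose step only ORs bits in
theorem pv_testBit_foldl_step {ι : Type} (g : Nat) (f : Nat → ι → Nat) (h : ι → Bool)
    (H : ∀ m i, Nat.testBit (f m i) g = (Nat.testBit m g || h i)) :
    ∀ (l : List ι) (m0 : Nat), Nat.testBit (l.foldl f m0) g = (Nat.testBit m0 g || l.any h)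
  | [], m0 => by simp
  | i :: t, m0 => by
      simp [List.foldl_cons, pv_testBit_foldl_step g f h H t, H, Bool.or_assoc]

-- a nonempty pattern occurs as a prefix at some scanned position iff it is a substring
theorem pv_range_any_prefix (w s : List Char) (hw : w ≠ []) :
    ((List.range s.length).any fun i => w.isPrefixOf (s.drop i)) = PySem.Chars.isIn w s := by
  rw [Bool.eq_iff_iff]
  simp only [List.any_eq_true, List.mem_range, List.isPrefixOf_iff_prefix]
  rw [← PySem.Chars.exists_prefix_drop_iff_isIn]
  constructor
  · rintro ⟨i, _, hp⟩; exact ⟨i, hp⟩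
  · rintro ⟨j, hp⟩
    by_cases hj : j < s.length
    · exact ⟨j, hj, hp⟩
    · exfalso
      rw [List.drop_eq_nil_of_le (le_of_not_gt hj)] at hp
      exact hw (List.prefix_nil.mp hp)

-- bit g of the scanned mask is set iff some word carrying bit g is a substring of s
theorem pv_testBit_mask (s : List Char) (g : Nat) :
    Nat.testBit (pvMatchedMask s) g
      = pvWordBits.any (fun p => Nat.testBit p.2 g && PySem.Chars.isIn p.1 s) := by
  unfold pvMatchedMask
  rw [pv_testBit_foldl_step g _
        (fun i => pvWordBits.any fun p => p.1.isPrefixOf (s.drop i) && Nat.testBit p.2 g)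
        (fun m i => by
          rw [pv_testBit_foldl_step g _ (fun p => p.1.isPrefixOf (s.drop i) && Nat.testBit p.2 g)
                (fun m p => by by_cases h : p.1.isPrefixOf (s.drop i) <;> simp [h, Nat.testBit_or])])]
  rw [Bool.eq_iff_iff]
  have hne : ∀ p ∈ pvWordBits, p.1 ≠ [] := by decide
  simp only [Nat.zero_testBit, Bool.false_or, List.any_eq_true, List.mem_range, Bool.and_eq_true]
  constructor
  · rintro ⟨i, hi, p, hp, hpre, hbit⟩
    refine ⟨p, hp, hbit, ?_⟩
    rw [← pv_range_any_prefix p.1 s (hne p hp)]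
    simp only [List.any_eq_true, List.mem_range]
    exact ⟨i, hi, hpre⟩
  · rintro ⟨p, hp, hbit, hin⟩
    rw [← pv_range_any_prefix p.1 s (hne p hp)] at hin
    simp only [List.any_eq_true, List.mem_range] at hin
    obtain ⟨i, hi, hpre⟩ := hin
    exact ⟨i, hi, p, hp, hpre, hbit⟩

-- the mask, expressed by the six per-group any-substring booleans
def pvBitsOf (a1 a2 a3 a4 a5 a6 : Bool) : Nat :=
  (cond a1 1 0) ||| (cond a2 2 0) ||| (cond a3 4 0) ||| (cond a4 8 0) ||| (cond a5 16 0) ||| (cond a6 32 0)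

theorem pv_testBit_cond (a : Bool) (v i : Nat) :
    Nat.testBit (cond a v 0) i = (a && Nat.testBit v i) := by cases a <;> simp

theorem pv_str_isIn (w s : String) :
    PySem.Str.isIn w s = PySem.Chars.isIn w.toList s.toList := by
  rw [Bool.eq_iff_iff, PySem.Str.isIn_iff_infix, PySem.Chars.isIn_iff_infix]

theorem pv_testBit_bitsOf (a1 a2 a3 a4 a5 a6 : Bool) (i : Nat) :
    Nat.testBit (pvBitsOf a1 a2 a3 a4 a5 a6) i =
      (a1 && Nat.testBit 1 i || (a2 && Nat.testBit 2 i || (a3 && Nat.testBit 4 i ||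
        (a4 && Nat.testBit 8 i || (a5 && Nat.testBit 16 i || a6 && Nat.testBit 32 i))))) := by
  simp [pvBitsOf, Nat.testBit_or, pv_testBit_cond, Bool.or_assoc]

theorem pv_mask_eq (s : String) :
    pvMatchedMask s.toList =
      pvBitsOf
        (["bullish", "optimistic", "positive", "growth", "aggressive"].any fun w => PySem.Str.isIn w s)
        (["bearish", "pessimistic", "negative", "decline", "conservative"].any fun w => PySem.Str.isIn w s)
        (["neutral", "balanced", "moderate", "cautious"].any fun w => PySem.Str.isIn w s)
        (["buy", "purchase", "acquire", "increase"].any fun w => PySem.Str.isIn w s)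
        (["sell", "reduce", "decrease", "exit"].any fun w => PySem.Str.isIn w s)
        (["hold", "maintain", "keep", "stay"].any fun w => PySem.Str.isIn w s) := by
  apply Nat.eq_of_testBit_eq
  intro i
  rw [pv_testBit_mask, pv_testBit_bitsOf]
  match i with
  | 0 => simp only [pvWordBits, List.any_cons, List.any_nil, pv_str_isIn,
      (by decide : Nat.testBit 1 0 = true), (by decide : Nat.testBit 2 0 = false), (by decide : Nat.testBit 4 0 = false), (by decide : Nat.testBit 8 0 = false), (by decide : Nat.testBit 16 0 = false), (by decide : Nat.testBit 32 0 = false),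
      Bool.false_and, Bool.true_and, Bool.and_false, Bool.and_true, Bool.or_false, Bool.false_or]
  | 1 => simp only [pvWordBits, List.any_cons, List.any_nil, pv_str_isIn,
      (by decide : Nat.testBit 1 1 = false), (by decide : Nat.testBit 2 1 = true), (by decide : Nat.testBit 4 1 = false), (by decide : Nat.testBit 8 1 = false), (by decide : Nat.testBit 16 1 = false), (by decide : Nat.testBit 32 1 = false),
      Bool.false_and, Bool.true_and, Bool.and_false, Bool.and_true, Bool.or_false, Bool.false_or]
  | 2 => simp only [pvWordBits, List.any_cons, List.any_nil, pv_str_isIn,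
      (by decide : Nat.testBit 1 2 = false), (by decide : Nat.testBit 2 2 = false), (by decide : Nat.testBit 4 2 = true), (by decide : Nat.testBit 8 2 = false), (by decide : Nat.testBit 16 2 = false), (by decide : Nat.testBit 32 2 = false),
      Bool.false_and, Bool.true_and, Bool.and_false, Bool.and_true, Bool.or_false, Bool.false_or]
  | 3 => simp only [pvWordBits, List.any_cons, List.any_nil, pv_str_isIn,
      (by decide : Nat.testBit 1 3 = false), (by decide : Nat.testBit 2 3 = false), (by decide : Nat.testBit 4 3 = false), (by decide : Nat.testBit 8 3 = true), (by decide : Nat.testBit 16 3 = false), (by decide : Nat.testBit 32 3 = false),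
      Bool.false_and, Bool.true_and, Bool.and_false, Bool.and_true, Bool.or_false, Bool.false_or]
  | 4 => simp only [pvWordBits, List.any_cons, List.any_nil, pv_str_isIn,
      (by decide : Nat.testBit 1 4 = false), (by decide : Nat.testBit 2 4 = false), (by decide : Nat.testBit 4 4 = false), (by decide : Nat.testBit 8 4 = false), (by decide : Nat.testBit 16 4 = true), (by decide : Nat.testBit 32 4 = false),
      Bool.false_and, Bool.true_and, Bool.and_false, Bool.and_true, Bool.or_false, Bool.false_or]
  | 5 => simp only [pvWordBits, List.any_cons, List.any_nil, pv_str_isIn,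
      (by decide : Nat.testBit 1 5 = false), (by decide : Nat.testBit 2 5 = false), (by decide : Nat.testBit 4 5 = false), (by decide : Nat.testBit 8 5 = false), (by decide : Nat.testBit 16 5 = false), (by decide : Nat.testBit 32 5 = true),
      Bool.false_and, Bool.true_and, Bool.and_false, Bool.and_true, Bool.or_false, Bool.false_or]
  | (n + 6) =>
      have hpow : (64 : Nat) ≤ 2 ^ (n + 6) := by
        calc (64 : Nat) = 2 ^ 6 := by norm_num
        _ ≤ 2 ^ (n + 6) := Nat.pow_le_pow_right (by norm_num) (by omega)
      have h1 : Nat.testBit 1 (n + 6) = false := Nat.testBit_eq_false_of_lt (lt_of_lt_of_le (by norm_num) hpow)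
      have h2 : Nat.testBit 2 (n + 6) = false := Nat.testBit_eq_false_of_lt (lt_of_lt_of_le (by norm_num) hpow)
      have h4 : Nat.testBit 4 (n + 6) = false := Nat.testBit_eq_false_of_lt (lt_of_lt_of_le (by norm_num) hpow)
      have h8 : Nat.testBit 8 (n + 6) = false := Nat.testBit_eq_false_of_lt (lt_of_lt_of_le (by norm_num) hpow)
      have h16 : Nat.testBit 16 (n + 6) = false := Nat.testBit_eq_false_of_lt (lt_of_lt_of_le (by norm_num) hpow)
      have h32 : Nat.testBit 32 (n + 6) = false := Nat.testBit_eq_false_of_lt (lt_of_lt_of_le (by norm_num) hpow)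
      simp only [pvWordBits, List.any_cons, List.any_nil, h1, h2, h4, h8, h16, h32,
        Bool.false_and, Bool.and_false, Bool.or_false]

theorem pv_key (s1 s2 : String) :
    get_similar_stance_words_py s1 s2 = get_similar_stance_words_py_alt s1 s2 := by
  simp only [get_similar_stance_words_py, get_similar_stance_words_py_alt, pvSimilarGroups,
    pvLoopA, pv_mask_eq]
  generalize (["bullish", "optimistic", "positive", "growth", "aggressive"].any fun w => PySem.Str.isIn w s1) = a1
  generalize (["bearish", "pessimistic", "negative", "decline", "conservative"].any fun w => PySem.Str.isIn w s1) = a2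
  generalize (["neutral", "balanced", "moderate", "cautious"].any fun w => PySem.Str.isIn w s1) = a3
  generalize (["buy", "purchase", "acquire", "increase"].any fun w => PySem.Str.isIn w s1) = a4
  generalize (["sell", "reduce", "decrease", "exit"].any fun w => PySem.Str.isIn w s1) = a5
  generalize (["hold", "maintain", "keep", "stay"].any fun w => PySem.Str.isIn w s1) = a6
  generalize (["bullish", "optimistic", "positive", "growth", "aggressive"].any fun w => PySem.Str.isIn w s2) = b1
  generalize (["bearish", "pessimistic", "negative", "decline", "conservative"].any fun w => PySem.Str.isIn w s2) = b2
  generalize (["neutral", "balanced", "moderate", "cautious"].any fun w => PySem.Str.isIn w s2) = b3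
  generalize (["buy", "purchase", "acquire", "increase"].any fun w => PySem.Str.isIn w s2) = b4
  generalize (["sell", "reduce", "decrease", "exit"].any fun w => PySem.Str.isIn w s2) = b5
  generalize (["hold", "maintain", "keep", "stay"].any fun w => PySem.Str.isIn w s2) = b6
  revert a1 a2 a3 a4 a5 a6 b1 b2 b3 b4 b5 b6
  decide

-- ===== VERDICT (by name: the statement is the Claim_ definition above) =====
theorem get_similar_stance_words_py_spec : Claim_equal_get_similar_stance_words_py := by
  intro s1 s2 _
  unfold Spec_get_similar_stance_words_py
  exact pv_key s1 s2
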